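-- pv_equiv track=rewrite | github.com/derekmiranda/rm-fs-code-test | sampleapp_be/helpers.py | get_missing_data_encoding
-- ===== SOURCE A (Python) =====
-- def get_missing_data_encoding(prop):
--     encoded_num_builder = ""
--     curr_num = 0
--     on_columns_with_data = None
--
--     for field in prop.keys():
--         val = prop[field]
--         field_has_data = bool(val)
--
--         if on_columns_with_data is None:
--             curr_num = 1
--         else:
--             # if in same data state, add 1 to curr_num
--             if on_columns_with_data == field_has_data:
--                 curr_num += 1
--             else:
--                 # append curr_num to num_builder
--                 encoded_num_builder += str(curr_num)
--                 # reset curr_num to 1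
--                 curr_num = 1
--         on_columns_with_data = field_has_data
--
--     encoded_num_builder += str(curr_num)
--     return int(encoded_num_builder)
-- ===== SOURCE B (Python) =====
-- def _merge_runs(left, right):
--     if not left:
--         return right
--     if not right:
--         return left
--     (s, a), (t, b) = left[-1], right[0]
--     if s == t:
--         return left[:-1] + [(s, a + b)] + right[1:]
--     return left + right
--
--
-- def _rle_dc(xs):
--     if len(xs) <= 1:
--         return [(xs[0], 1)] if xs else []
--     mid = len(xs) // 2
--     return _merge_runs(_rle_dc(xs[:mid]), _rle_dc(xs[mid:]))
--
--
-- def get_missing_data_encoding(prop):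
--     runs = _rle_dc([bool(v) for v in prop.values()])
--     if not runs:
--         return 0
--     return int("".join(str(k) for _, k in runs))
-- ===== Notes on version B (the rewrite author's own statement) =====
-- stated objective: alternative
-- what changed: Replaces A's single forward state machine that mutates a digit-string builder with a divide-and-conquer run-length encoder: recursively RLE each half of the truthiness list and merge the two run lists at the boundary, then render the run lengths once.
import Mathlib
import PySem

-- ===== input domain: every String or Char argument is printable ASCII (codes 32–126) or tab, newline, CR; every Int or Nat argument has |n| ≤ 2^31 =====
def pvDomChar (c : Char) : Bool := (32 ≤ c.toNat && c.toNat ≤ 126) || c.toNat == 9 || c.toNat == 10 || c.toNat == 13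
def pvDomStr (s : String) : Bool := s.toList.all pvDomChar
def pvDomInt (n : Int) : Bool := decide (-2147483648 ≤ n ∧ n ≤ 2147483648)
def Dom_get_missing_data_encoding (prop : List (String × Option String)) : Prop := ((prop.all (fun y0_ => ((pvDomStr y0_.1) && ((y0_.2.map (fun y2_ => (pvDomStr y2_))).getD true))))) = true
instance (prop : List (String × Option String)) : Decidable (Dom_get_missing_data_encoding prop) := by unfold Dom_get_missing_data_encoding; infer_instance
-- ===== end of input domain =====

-- B replaces A's forward state machine with a divide-and-conquer run-length encoder
-- (RLE each half, merge at the boundary); objective: alternative, not claimed faster.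

-- bool(val) for val : Option String — None and "" are falsy
def pvTruthy (v : Option String) : Bool :=
  match v with
  | none => false
  | some s => !(s.toList.isEmpty)

-- ===== PORT A =====
-- the loop body of A (state: encoded_num_builder as chars, curr_num, on_columns_with_data)
def aStep (acc : List Char × Int × Option Bool) (h : Bool) : List Char × Int × Option Bool :=
  match acc.2.2 with
  | none => (acc.1, 1, some h)
  | some b => if b == h then (acc.1, acc.2.1 + 1, some h)
              else (acc.1 ++ PySem.Int.toChars acc.2.1, 1, some h)

def get_missing_data_encoding (prop : List (String × Option String)) : Int :=
  let d := PySem.Dict.ofList prop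
  let st := d.keys.foldl
    (fun acc field =>
      -- val = prop[field]; field ∈ prop.keys so the KeyError default is never used
      let val := PySem.Dict.getD d field none
      aStep acc (pvTruthy val))
    (([] : List Char), (0 : Int), (none : Option Bool))
  -- int(encoded_num_builder + str(curr_num)); the string is nonempty digits, never ValueError
  (PySem.Int.ofChars? (st.1 ++ PySem.Int.toChars st.2.1)).getD 0

-- ===== PORT B =====
-- _merge_runs: join two run lists, fusing the boundary runs if they share a state
def mergeRuns (l r : List (Bool × Int)) : List (Bool × Int) :=
  if hl : l = [] then r
  else if hr : r = [] then l
  else if (l.getLast hl).1 == (r.head hr).1 then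
    l.dropLast ++ [((l.getLast hl).1, (l.getLast hl).2 + (r.head hr).2)] ++ r.tail
  else l ++ r

-- _rle_dc: divide-and-conquer run-length encoding
def rleDC (xs : List Bool) : List (Bool × Int) :=
  if _h : xs.length ≤ 1 then
    match xs with
    | [] => []
    | c :: _ => [(c, 1)]
  else
    let mid := xs.length / 2
    mergeRuns (rleDC (xs.take mid)) (rleDC (xs.drop mid))
termination_by xs.length
decreasing_by
  · simp only [List.length_take]; omega
  · simp only [List.length_drop]; omega

def get_missing_data_encoding_alt (prop : List (String × Option String)) : Int :=
  let d := PySem.Dict.ofList prop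
  let runs := rleDC ((PySem.Dict.values d).map pvTruthy)
  if runs = [] then 0
  else
    -- int("".join(str(k) for _, k in runs)); nonempty digits, never ValueError
    (PySem.Int.ofChars? ((runs.map (fun p => PySem.Int.toChars p.2)).flatten)).getD 0

-- ===== PRECONDITION & SPEC =====
def Spec_get_missing_data_encoding (prop : List (String × Option String)) (out : Int) : Prop := out = get_missing_data_encoding_alt prop
instance (prop : List (String × Option String)) (out : Int) : Decidable (Spec_get_missing_data_encoding prop out) := by unfold Spec_get_missing_data_encoding; infer_instance

-- ===== CLAIM (what is proved, stated in full; the proofs are below) =====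
def Claim_equal_get_missing_data_encoding : Prop := ∀ (prop : List (String × Option String)), Dom_get_missing_data_encoding prop → Spec_get_missing_data_encoding prop (get_missing_data_encoding prop)

-- ===== LEMMAS AND PROOFS =====

-- canonical left-to-right RLE, the common specification of both programs
def rleGo (b : Bool) (n : Int) : List Bool → List (Bool × Int)
  | [] => [(b, n)]
  | c :: r => if c == b then rleGo b (n + 1) r else (b, n) :: rleGo c 1 r

def rle : List Bool → List (Bool × Int)
  | [] => []
  | c :: r => rleGo c 1 r

-- run lengths only (what A's digit builder tracks)
def goRuns (b : Bool) (n : Int) : List Bool → List Int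
  | [] => [n]
  | c :: r => if c == b then goRuns b (n + 1) r else n :: goRuns c 1 r

theorem snd_rleGo (bs : List Bool) : ∀ (b : Bool) (n : Int),
    (rleGo b n bs).map Prod.snd = goRuns b n bs := by
  induction bs with
  | nil => intro b n; simp [rleGo, goRuns]
  | cons c r ih =>
    intro b n
    by_cases h : c = b <;> simp [rleGo, goRuns, h, ih]

-- A's fold, started inside a run, emits exactly the digits of the run lengths
theorem aFold_chars (bs : List Bool) : ∀ (b : Bool) (n : Int) (builder : List Char),
    (bs.foldl aStep (builder, n, some b)).1
      ++ PySem.Int.toChars (bs.foldl aStep (builder, n, some b)).2.1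
    = builder ++ ((goRuns b n bs).map PySem.Int.toChars).flatten := by
  induction bs with
  | nil => intro b n builder; simp [goRuns]
  | cons c rest ih =>
    intro b n builder
    by_cases hbc : b = c
    · simp [List.foldl_cons, aStep, goRuns, hbc, ih]
    · have : (b == c) = false := by simp [hbc]
      simp [List.foldl_cons, aStep, goRuns, this, ih, Ne.symm hbc]

-- number of leading elements of bs equal to b
def leadCnt (b : Bool) : List Bool → Nat
  | [] => 0
  | c :: r => if c == b then leadCnt b r + 1 else 0

theorem rleGo_split (bs : List Bool) : ∀ (b : Bool) (n : Int),
    rleGo b n bs = (b, n + (leadCnt b bs : Int)) :: rle (bs.drop (leadCnt b bs)) := by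
  induction bs with
  | nil => intro b n; simp [rleGo, leadCnt, rle]
  | cons c r ih =>
    intro b n
    by_cases hbc : c = b
    · simp only [rleGo, leadCnt, hbc, beq_self_eq_true, if_true, ih, List.drop_succ_cons]
      congr 2
      push_cast; ring
    · have : (c == b) = false := by simp [hbc]
      simp [rleGo, leadCnt, this, rle]

theorem rleGo_ne_nil (b : Bool) (n : Int) (bs : List Bool) : rleGo b n bs ≠ [] := by
  rw [rleGo_split]; simp

-- mergeRuns commutes with a cons whose tail is nonempty
theorem mergeRuns_cons (p : Bool × Int) (X Y : List (Bool × Int)) (hX : X ≠ []) :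
    mergeRuns (p :: X) Y = p :: mergeRuns X Y := by
  unfold mergeRuns
  rcases Y with _ | ⟨q, Yt⟩
  · simp [hX]
  · rw [dif_neg (by simp : ¬(p :: X) = []), dif_neg (by simp : ¬(q :: Yt) = []),
      dif_neg hX, dif_neg (by simp : ¬(q :: Yt) = [])]
    rw [List.getLast_cons hX, List.dropLast_cons_of_ne_nil hX]
    split_ifs <;> simp

theorem mergeRuns_single (b : Bool) (n : Int) (r : List Bool) :
    mergeRuns [(b, n)] (rle r) = rleGo b n r := by
  rcases r with _ | ⟨c, t⟩
  · simp [rle, mergeRuns, rleGo]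
  · show mergeRuns [(b, n)] (rleGo c 1 t) = rleGo b n (c :: t)
    rw [rleGo_split t c 1]
    by_cases hbc : b = c
    · subst hbc
      show mergeRuns [(b, n)] ((b, 1 + (leadCnt b t : Int)) :: rle (t.drop (leadCnt b t)))
        = rleGo b n (b :: t)
      have hR : rleGo b n (b :: t)
          = (b, n + 1 + (leadCnt b t : Int)) :: rle (t.drop (leadCnt b t)) := by
        simp only [rleGo, beq_self_eq_true, if_true]
        rw [rleGo_split]
      rw [hR]
      simp only [mergeRuns, List.getLast_singleton, List.head_cons, beq_self_eq_true, if_true,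
        List.tail_cons, dif_neg (by simp : ¬([(b, n)] : List (Bool × Int)) = []),
        dif_neg (List.cons_ne_nil _ _)]
      show [(b, n)].dropLast ++ [(b, n + (1 + (leadCnt b t : Int)))] ++ _ = _
      simp only [List.dropLast_singleton, List.nil_append, List.singleton_append]
      congr 2
      ring
    · have hne : (b == c) = false := by simp [hbc]
      have hcb : (c == b) = false := by simp [Ne.symm hbc]
      simp only [rleGo, hcb, Bool.false_eq_true, if_false]
      rw [rleGo_split t c 1]
      simp only [mergeRuns, List.getLast_singleton, List.head_cons, hne, Bool.false_eq_true,
        if_false, dif_neg (by simp : ¬([(b, n)] : List (Bool × Int)) = []),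
        dif_neg (List.cons_ne_nil _ _)]
      rfl

theorem mergeRuns_rleGo (l : List Bool) : ∀ (b : Bool) (n : Int) (r : List Bool),
    mergeRuns (rleGo b n l) (rle r) = rleGo b n (l ++ r) := by
  induction l with
  | nil => intro b n r; simpa [rleGo] using mergeRuns_single b n r
  | cons c l' ih =>
    intro b n r
    by_cases hcb : c = b
    · have h : (c == b) = true := by simp [hcb]
      simp only [rleGo, h, if_true, List.cons_append]
      exact ih b (n + 1) r
    · have h : (c == b) = false := by simp [hcb]
      simp only [rleGo, h, Bool.false_eq_true, if_false, List.cons_append]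
      rw [mergeRuns_cons _ _ _ (rleGo_ne_nil c 1 l')]
      rw [ih c 1 r]

theorem mergeRuns_rle (l r : List Bool) :
    mergeRuns (rle l) (rle r) = rle (l ++ r) := by
  rcases l with _ | ⟨c, l'⟩
  · simp [rle, mergeRuns]
  · show mergeRuns (rleGo c 1 l') (rle r) = rle (c :: l' ++ r)
    rw [mergeRuns_rleGo]
    rfl

-- the divide-and-conquer encoder computes the canonical RLE
theorem rleDC_eq (xs : List Bool) : rleDC xs = rle xs := by
  fun_induction rleDC with
  | case1 _ _ => rfl
  | case2 c t h _ =>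
    rcases t with _ | ⟨x, t'⟩
    · rfl
    · simp at h
  | case3 xs h mid ih1 ih2 =>
    rw [ih1, ih2, mergeRuns_rle, List.take_append_drop]

theorem ports_agree (prop : List (String × Option String)) :
    get_missing_data_encoding prop = get_missing_data_encoding_alt prop := by
  unfold get_missing_data_encoding get_missing_data_encoding_alt
  set d := PySem.Dict.ofList prop with hd
  have hnd : d.keys.Nodup := PySem.Dict.nodup_keys_ofList prop
  have hfold : d.keys.foldl (fun acc field => aStep acc (pvTruthy (PySem.Dict.getD d field none)))
      (([] : List Char), (0 : Int), (none : Option Bool))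
    = ((PySem.Dict.values d).map pvTruthy).foldl aStep (([] : List Char), (0 : Int), (none : Option Bool)) := by
    rw [PySem.Dict.values_eq_map_keys d hnd none, List.map_map, ← List.foldl_map]
    rfl
  simp only []
  rw [hfold, rleDC_eq]
  cases hs : (PySem.Dict.values d).map pvTruthy with
  | nil => simp [rle]; decide
  | cons s0 rest =>
    have hne : rle (s0 :: rest) ≠ [] := rleGo_ne_nil s0 1 rest
    rw [if_neg hne]
    simp only [List.foldl_cons]
    have h1 : aStep (([] : List Char), (0 : Int), (none : Option Bool)) s0
        = (([] : List Char), (1 : Int), some s0) := rfl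
    rw [h1, aFold_chars]
    have h2 : (rle (s0 :: rest)).map (fun p => PySem.Int.toChars p.2)
        = (goRuns s0 1 rest).map PySem.Int.toChars := by
      show (rleGo s0 1 rest).map (fun p => PySem.Int.toChars p.2) = _
      rw [← snd_rleGo, List.map_map]
      rfl
    rw [h2]
    simp

-- ===== VERDICT (by name: the statement is the Claim_ definition above) =====
theorem get_missing_data_encoding_spec : Claim_equal_get_missing_data_encoding := by
  intro prop _
  unfold Spec_get_missing_data_encoding
  exact ports_agree prop
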